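-- pv_equiv track=rewrite | github.com/dani1552/coding-test-js | 프로그래머스/0/181879. 길이에 따른 연산/길이에 따른 연산.py | solution
-- ===== SOURCE A (Python) =====
-- def solution(num_list):
--     answer = 1
--
--     for n in num_list:
--         if len(num_list) > 10:
--             answer += n
--         else:
--             answer *= n
--
--     if len(num_list) > 10:
--         return answer - 1
--     else:
--         return answer
-- ===== SOURCE B (Python) =====
-- def _reduce(add, xs):
--     # divide and conquer: combine halves with + or *
--     if not xs:
--         return 0 if add else 1
--     if len(xs) == 1:
--         return xs[0]
--     mid = len(xs) // 2
--     left = _reduce(add, xs[:mid])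
--     right = _reduce(add, xs[mid:])
--     return left + right if add else left * right
--
-- def solution(num_list):
--     return _reduce(len(num_list) > 10, num_list)
-- ===== Notes on version B (the rewrite author's own statement) =====
-- stated objective: alternative
-- what changed: Replaces A's single left-to-right accumulator loop (with a per-element length test and a final '- 1' fixup) by a recursive divide-and-conquer reduction: the operation (+ or *) is chosen once from the length, then the list is split in halves and the two sub-results are combined.
import Mathlib
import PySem

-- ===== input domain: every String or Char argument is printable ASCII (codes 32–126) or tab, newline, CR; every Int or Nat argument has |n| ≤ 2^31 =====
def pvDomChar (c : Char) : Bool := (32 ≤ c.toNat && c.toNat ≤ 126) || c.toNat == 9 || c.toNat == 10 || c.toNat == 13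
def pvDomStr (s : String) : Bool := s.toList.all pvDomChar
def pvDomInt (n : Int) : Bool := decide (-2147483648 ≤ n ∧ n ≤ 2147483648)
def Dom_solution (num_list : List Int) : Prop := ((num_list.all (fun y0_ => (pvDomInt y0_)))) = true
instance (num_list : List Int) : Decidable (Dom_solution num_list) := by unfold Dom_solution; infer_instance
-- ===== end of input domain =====

-- B replaces A's single accumulator loop by a divide-and-conquer reduction (alternative decomposition, same cost).


-- ===== PORT A =====
-- literal transliteration: accumulator loop with the per-element length test, then the final fixup
def solution (num_list : List Int) : Int :=
  let answer : Int := 1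
  let answer := num_list.foldl (fun answer n =>
    if num_list.length > 10 then answer + n else answer * n) answer
  if num_list.length > 10 then answer - 1 else answer

-- ===== PORT B =====
-- divide-and-conquer reduction: split at the midpoint, combine halves with + or *
def dcReduce (add : Bool) (xs : List Int) : Int :=
  if xs = [] then (if add then 0 else 1)
  else if xs.length = 1 then xs.headI
  else
    let mid := xs.length / 2
    let left := dcReduce add (xs.take mid)
    let right := dcReduce add (xs.drop mid)
    if add then left + right else left * right
  termination_by xs.length
  decreasing_by
  · simp [List.length_take]
    rename_i h0 h1
    have : xs.length ≠ 0 := by simpa [List.length_eq_zero_iff] using h0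
    omega
  · simp [List.length_drop]
    rename_i h0 h1
    have : xs.length ≠ 0 := by simpa [List.length_eq_zero_iff] using h0
    omega

def solution_alt (num_list : List Int) : Int :=
  dcReduce (num_list.length > 10) num_list

-- ===== PRECONDITION & SPEC =====
def Spec_solution (num_list : List Int) (out : Int) : Prop := out = solution_alt num_list
instance (num_list : List Int) (out : Int) : Decidable (Spec_solution num_list out) := by unfold Spec_solution; infer_instance

-- ===== CLAIM (what is proved, stated in full; the proofs are below) =====
def Claim_equal_solution : Prop := ∀ (num_list : List Int), Dom_solution num_list → Spec_solution num_list (solution num_list)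

-- ===== LEMMAS AND PROOFS =====
-- the divide-and-conquer reduction computes the sum (add = true) or the product (add = false)
theorem dcReduce_eval (add : Bool) (xs : List Int) :
    dcReduce add xs = if add then xs.sum else xs.prod := by
  induction xs using dcReduce.induct (add := add) with
  | case1 h => simp [dcReduce, h]
  | case2 h => simp [dcReduce, h]
  | case3 xs h0 h1 =>
    obtain ⟨a, ha⟩ := List.length_eq_one_iff.mp h1
    subst ha; cases add <;> simp [dcReduce]
  | case4 xs h0 h1 mid ha ihl ihr =>
    subst ha
    rw [dcReduce]
    simp only [h0, h1, if_false, if_true]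
    simp only [if_true] at ihl ihr
    show dcReduce true (List.take mid xs) + dcReduce true (List.drop mid xs) = xs.sum
    rw [ihl, ihr, ← List.sum_append, List.take_append_drop]
  | case5 xs h0 h1 mid ha ihl ihr =>
    have ha' : add = false := by simpa using ha
    subst ha'
    rw [dcReduce]
    simp only [h0, h1, if_false, Bool.false_eq_true]
    simp only [Bool.false_eq_true, if_false] at ihl ihr
    show dcReduce false (List.take mid xs) * dcReduce false (List.drop mid xs) = xs.prod
    rw [ihl, ihr, ← List.prod_append, List.take_append_drop]

-- loop invariant for A's sum branch
theorem pv_foldl_add (xs : List Int) (a : Int) :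
    xs.foldl (fun acc n => acc + n) a = a + xs.sum := by
  induction xs generalizing a with
  | nil => simp
  | cons x xs ih => simp [List.foldl, ih, List.sum_cons]; ring

-- loop invariant for A's product branch
theorem pv_foldl_mul (xs : List Int) (a : Int) :
    xs.foldl (fun acc n => acc * n) a = a * xs.prod := by
  induction xs generalizing a with
  | nil => simp
  | cons x xs ih => simp [List.foldl, ih, List.prod_cons]; ring

-- ===== VERDICT (by name: the statement is the Claim_ definition above) =====
theorem solution_spec : Claim_equal_solution := by
  intro num_list _
  unfold Spec_solution solution solution_alt
  rw [dcReduce_eval]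
  by_cases h : num_list.length > 10
  · simp only [h, decide_true, if_true]
    rw [pv_foldl_add]; ring
  · simp only [h, decide_false, if_false, Bool.false_eq_true]
    rw [pv_foldl_mul]; ring
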